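-- pv_equiv track=rewrite | github.com/wshuai294/Bacteria-assembly | scripts/measure_blast.py | sort_interval
-- ===== SOURCE A (Python) =====
-- def sort_interval(interval_list):
--     if len(interval_list) < 2:
--         return interval_list
--     flag = True
--     while flag:
--         flag = False
--         for i in range(1, len(interval_list)):
--             if interval_list[i-1][0] > interval_list[i][0]:
--                 a = interval_list[i-1].copy()
--                 interval_list[i-1] = interval_list[i]
--                 interval_list[i] = a
--                 flag = True
--     return interval_list
-- ===== SOURCE B (Python) =====
-- def _insert(x, s):
--     # place x after all elements of sorted list s whose first element is <= x[0]
--     i = 0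
--     while i < len(s) and s[i][0] <= x[0]:
--         i += 1
--     return s[:i] + [x] + s[i:]
--
-- def sort_interval(interval_list):
--     if len(interval_list) < 2:
--         return interval_list
--     out = []
--     for interval in interval_list:
--         out = _insert(interval, out)
--     return out
-- ===== Notes on version B (the rewrite author's own statement) =====
-- stated objective: faster
-- what changed: Replaces A's repeated whole-list bubble passes (loop until a pass makes no adjacent swap) by a single left-to-right insertion sort that splices each interval into a growing sorted output list (stable <=-scan), building a new list instead of mutating in place.
-- outside the precondition, e.g. on sort_interval([[1, 2], [], [0]]): A raises IndexError, B raises IndexError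
import Mathlib
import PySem

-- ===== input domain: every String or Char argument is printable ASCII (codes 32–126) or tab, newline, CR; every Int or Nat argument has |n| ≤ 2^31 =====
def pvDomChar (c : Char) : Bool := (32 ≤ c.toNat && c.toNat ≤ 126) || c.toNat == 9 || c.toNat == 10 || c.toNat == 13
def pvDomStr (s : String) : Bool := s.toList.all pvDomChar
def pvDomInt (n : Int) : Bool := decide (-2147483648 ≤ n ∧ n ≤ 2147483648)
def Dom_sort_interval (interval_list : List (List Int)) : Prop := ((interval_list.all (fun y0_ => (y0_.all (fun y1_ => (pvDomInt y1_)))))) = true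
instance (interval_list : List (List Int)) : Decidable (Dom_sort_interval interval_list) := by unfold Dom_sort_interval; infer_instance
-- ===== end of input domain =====

-- B replaces A's repeated bubble passes by a single-pass insertion sort (growing sorted prefix);
-- equivalence is about the RETURN value only: A sorts its argument in place, B builds a fresh list.

-- ===== PORT A =====

-- interval[0]; exact on Pre_ (inner lists nonempty where accessed): pyGet? = none never occurs there
def pvKey (x : List Int) : Int := (PySem.List.pyGet? x 0).getD 0

-- one in-place bubble pass of the `for i in range(1, len(..))` loop: after a swap the moved
-- element (old interval_list[i-1]) is carried forward and compared with the next one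
def pvPass : List (List Int) → List (List Int) × Bool
  | x :: y :: rest =>
    if pvKey x > pvKey y then
      let p := pvPass (x :: rest); (y :: p.1, true)
    else
      let p := pvPass (y :: rest); (x :: p.1, p.2)
  | l => (l, false)
termination_by l => l.length

-- number of strict inversions of the key sequence (termination measure for the while loop)
def pvInv : List (List Int) → Nat
  | [] => 0
  | x :: xs => xs.countP (fun y => pvKey y < pvKey x) + pvInv xs

theorem pvPass_perm : ∀ l : List (List Int), (pvPass l).1.Perm l := by
  intro l
  induction l using pvPass.induct with
  | case1 x y rest h ih =>
    simp only [pvPass, if_pos h]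
    exact ((ih.cons y).trans (List.Perm.cons y (List.Perm.refl _))).trans
      (List.Perm.swap x y rest)
  | case2 x y rest h ih =>
    simp only [pvPass, if_neg h]
    exact ih.cons x
  | case3 l h1 =>
    cases l with
    | nil => simp [pvPass]
    | cons a t => cases t with
      | nil => simp [pvPass]
      | cons b u => exact absurd rfl (h1 a b u)

theorem pvPass_inv (l : List (List Int)) :
    (if (pvPass l).2 then pvInv (pvPass l).1 < pvInv l else (pvPass l).1 = l) := by
  induction l using pvPass.induct with
  | case1 x y rest h ih =>
    simp only [pvPass, if_pos h, if_true]
    -- goal: pvInv (y :: (pvPass (x::rest)).1) < pvInv (x :: y :: rest)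
    have hperm : (pvPass (x :: rest)).1.Perm (x :: rest) := pvPass_perm _
    have hcount : ∀ f : List Int → Bool,
        (pvPass (x :: rest)).1.countP f = (x :: rest).countP f := fun f => hperm.countP_eq f
    have hle : pvInv (pvPass (x :: rest)).1 ≤ pvInv (x :: rest) := by
      rcases hp : (pvPass (x :: rest)).2 with _ | _
      · have := ih; rw [hp] at this; simp at this; rw [this]
      · have := ih; rw [hp] at this; simp at this; omega
    simp only [pvInv] at hle
    have hxy : pvKey y < pvKey x := h
    simp only [pvInv, hcount]
    simp only [List.countP_cons]
    have h1 : (decide (pvKey x < pvKey y) : Bool) = false := by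
      simp; omega
    have h2 : (decide (pvKey y < pvKey x) : Bool) = true := by
      simp; omega
    simp [h1, h2]
    omega
  | case2 x y rest h ih =>
    simp only [pvPass, if_neg h]
    rcases hp : (pvPass (y :: rest)).2 with _ | _
    · have := ih; rw [hp] at this; simp at this
      simp [this]
    · have := ih; rw [hp] at this; simp at this
      simp only [if_true]
      have hcount : (pvPass (y :: rest)).1.countP (fun z => pvKey z < pvKey x)
          = (y :: rest).countP (fun z => pvKey z < pvKey x) :=
        (pvPass_perm _).countP_eq _
      simp only [pvInv, hcount]
      simp only [pvInv] at this
      omega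
  | case3 l h1 =>
    cases l with
    | nil => simp [pvPass]
    | cons a t => cases t with
      | nil => simp [pvPass]
      | cons b u => exact absurd rfl (h1 a b u)

theorem pvPass_inv_lt (l : List (List Int)) (h : (pvPass l).2 = true) :
    pvInv (pvPass l).1 < pvInv l := by
  have := pvPass_inv l; rw [h] at this; simpa using this

-- the `while flag:` loop: run a pass; repeat while a swap happened
def pvBubble (l : List (List Int)) : List (List Int) :=
  if h : (pvPass l).2 then pvBubble (pvPass l).1 else (pvPass l).1
termination_by pvInv l
decreasing_by exact pvPass_inv_lt l h

def sort_interval (interval_list : List (List Int)) : List (List Int) :=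
  if interval_list.length < 2 then interval_list
  else pvBubble interval_list

-- ===== PORT B =====

-- _insert: scan the sorted list past every element with key ≤ key x, splice x in there
def pvIns (x : List Int) : List (List Int) → List (List Int)
  | [] => [x]
  | y :: ys => if pvKey y ≤ pvKey x then y :: pvIns x ys else x :: y :: ys

def sort_interval_alt (interval_list : List (List Int)) : List (List Int) :=
  if interval_list.length < 2 then interval_list
  else interval_list.foldl (fun out x => pvIns x out) []

-- ===== PRECONDITION & SPEC =====
-- Pre_ excludes exactly the inputs on which Python A raises IndexError (an empty inner
-- list while len(interval_list) >= 2); Python B raises there as well.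
def Pre_sort_interval (interval_list : List (List Int)) : Prop :=
  interval_list.length < 2 ∨ ∀ x ∈ interval_list, x ≠ []
instance (interval_list : List (List Int)) : Decidable (Pre_sort_interval interval_list) := by
  unfold Pre_sort_interval; infer_instance
def pvWitness_sort_interval : List (List Int) := [[3, 5], [1, 2], [1, 7]]

def Spec_sort_interval (interval_list : List (List Int)) (out : List (List Int)) : Prop := out = sort_interval_alt interval_list
instance (interval_list : List (List Int)) (out : List (List Int)) : Decidable (Spec_sort_interval interval_list out) := by unfold Spec_sort_interval; infer_instance

-- ===== CLAIM (what is proved, stated in full; the proofs are below) =====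
def Claim_equal_sort_interval : Prop := ∀ (interval_list : List (List Int)), Dom_sort_interval interval_list → Pre_sort_interval interval_list → Spec_sort_interval interval_list (sort_interval interval_list)

-- ===== LEMMAS AND PROOFS =====

-- folding pvIns from any accumulator
def pvIsort (acc l : List (List Int)) : List (List Int) :=
  l.foldl (fun out x => pvIns x out) acc

theorem pvIns_comm (x y : List Int) (h : pvKey y < pvKey x) :
    ∀ acc : List (List Int), pvIns x (pvIns y acc) = pvIns y (pvIns x acc) := by
  have hyx : pvKey y ≤ pvKey x := h.le
  have hnxy : ¬ pvKey x ≤ pvKey y := not_le.mpr h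
  intro acc
  induction acc with
  | nil => simp [pvIns, hyx, hnxy]
  | cons a as ih =>
    by_cases hya : pvKey a ≤ pvKey y
    · have hxa : pvKey a ≤ pvKey x := hya.trans hyx
      simp [pvIns, hya, hxa, ih]
    · by_cases hxa : pvKey a ≤ pvKey x
      · simp [pvIns, hya, hxa, hyx]
      · simp [pvIns, hya, hxa, hyx, hnxy]

theorem pvIsort_pass (l : List (List Int)) :
    ∀ acc, pvIsort acc (pvPass l).1 = pvIsort acc l := by
  induction l using pvPass.induct with
  | case1 x y rest h ih =>
    intro acc
    simp only [pvPass, if_pos h]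
    show pvIsort (pvIns y acc) (pvPass (x :: rest)).1 = pvIsort acc (x :: y :: rest)
    rw [ih]
    show pvIsort (pvIns x (pvIns y acc)) rest = pvIsort (pvIns y (pvIns x acc)) rest
    rw [pvIns_comm x y h]
  | case2 x y rest h ih =>
    intro acc
    simp only [pvPass, if_neg h]
    show pvIsort (pvIns x acc) (pvPass (y :: rest)).1 = pvIsort acc (x :: y :: rest)
    rw [ih]
    rfl
  | case3 l h1 =>
    cases l with
    | nil => simp [pvPass]
    | cons a t => cases t with
      | nil => simp [pvPass]
      | cons b u => exact absurd rfl (h1 a b u)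

-- a pass with no swap means the key sequence is nondecreasing
theorem pvPass_sorted (l : List (List Int)) (h : (pvPass l).2 = false) :
    l.Pairwise (fun a b => pvKey a ≤ pvKey b) := by
  induction l using pvPass.induct with
  | case1 x y rest hxy ih =>
    simp only [pvPass, if_pos hxy] at h
    simp at h
  | case2 x y rest hxy ih =>
    simp only [pvPass, if_neg hxy] at h
    have htail := ih h
    refine List.pairwise_cons.mpr ⟨?_, htail⟩
    intro z hz
    rcases List.mem_cons.mp hz with hz | hz
    · subst hz; omega
    · have := (List.pairwise_cons.mp htail).1 z hz
      omega
  | case3 l h1 =>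
    cases l with
    | nil => simp
    | cons a t => cases t with
      | nil => simp
      | cons b u => exact absurd rfl (h1 a b u)

theorem pvIns_append (x : List Int) (acc : List (List Int))
    (h : ∀ a ∈ acc, pvKey a ≤ pvKey x) : pvIns x acc = acc ++ [x] := by
  induction acc with
  | nil => rfl
  | cons a as ih =>
    have := h a (by simp)
    simp [pvIns, this]
    exact ih (fun b hb => h b (by simp [hb]))

theorem pvIsort_sorted (l : List (List Int)) :
    ∀ acc, (acc ++ l).Pairwise (fun a b => pvKey a ≤ pvKey b) → pvIsort acc l = acc ++ l := by
  induction l with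
  | nil => intro acc _; simp [pvIsort]
  | cons x xs ih =>
    intro acc h
    show pvIsort (pvIns x acc) xs = acc ++ x :: xs
    have hx : ∀ a ∈ acc, pvKey a ≤ pvKey x := by
      intro a ha
      have := (List.pairwise_append.mp h).2.2 a ha x (by simp)
      exact this
    rw [pvIns_append x acc hx]
    have : (acc ++ [x]) ++ xs = acc ++ x :: xs := by simp
    rw [ih (acc ++ [x]) (by rw [this]; exact h), this]

theorem pvBubble_eq_isort (l : List (List Int)) : pvBubble l = pvIsort [] l := by
  induction l using pvBubble.induct with
  | case1 l hp ih =>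
    rw [pvBubble]
    rw [dif_pos hp, ih, pvIsort_pass]
  | case2 l hp =>
    rw [pvBubble]
    rw [dif_neg hp]
    have hp' : (pvPass l).2 = false := by simpa using hp
    have heq : (pvPass l).1 = l := by
      have := pvPass_inv l
      rw [hp'] at this; simpa using this
    rw [heq]
    have hpair : l.Pairwise (fun a b => pvKey a ≤ pvKey b) := pvPass_sorted l hp'
    have := pvIsort_sorted l [] (by simpa using hpair)
    simpa using this.symm

-- ===== VERDICT (by name: the statement is the Claim_ definition above) =====
theorem sort_interval_spec : Claim_equal_sort_interval := by
  intro l _ _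
  unfold Spec_sort_interval sort_interval sort_interval_alt
  split
  · rfl
  · exact pvBubble_eq_isort l
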